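-- pv_equiv track=rewrite | github.com/glebkuznetsov/nucleic | nucleic/filters.py | three_prime
-- ===== SOURCE A (Python) =====
-- def three_prime(seq, max_gcs, max_gc_run):
--     tp = seq[-5:]
--     gcs = tp.count('G') + tp.count('C')
--     if gcs > max_gcs:
--         return False
--     gc_run = 0
--     for b in tp:
--         if b in 'GC':
--             gc_run += 1
--             if gc_run > max_gc_run:
--                 return False
--         else:
--             gc_run = 0
--     return True
-- ===== SOURCE B (Python) =====
-- def three_prime(seq, max_gcs, max_gc_run):
--     tp = seq[-5:]
--     if tp.count('G') + tp.count('C') > max_gcs: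
--         return False
--     w = max(max_gc_run + 1, 1)
--     return not any(all(b in 'GC' for b in tp[i:i + w])
--                    for i in range(len(tp) - w + 1))
-- ===== Notes on version B (the rewrite author's own statement) =====
-- stated objective: alternative
-- what changed: A streams over the slice with a running GC counter and early returns; B keeps the gcs count but replaces the run check by a brute-force sliding-window test: it returns True iff no window of length max(max_gc_run+1,1) inside the last-5 slice consists entirely of G/C (any/all over all window start positions).
import Mathlib
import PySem

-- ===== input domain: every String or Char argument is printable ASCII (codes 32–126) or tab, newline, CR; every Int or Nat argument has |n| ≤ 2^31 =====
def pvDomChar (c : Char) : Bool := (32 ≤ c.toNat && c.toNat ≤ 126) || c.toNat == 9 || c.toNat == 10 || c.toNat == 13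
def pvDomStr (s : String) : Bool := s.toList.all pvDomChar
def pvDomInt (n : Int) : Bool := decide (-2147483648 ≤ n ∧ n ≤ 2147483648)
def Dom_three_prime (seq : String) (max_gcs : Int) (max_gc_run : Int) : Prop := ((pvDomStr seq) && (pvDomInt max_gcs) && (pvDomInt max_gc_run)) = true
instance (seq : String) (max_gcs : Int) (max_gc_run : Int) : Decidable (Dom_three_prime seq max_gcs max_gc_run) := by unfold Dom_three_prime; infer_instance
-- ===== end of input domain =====

-- B replaces A's streaming GC-run counter with a brute-force sliding-window test
-- ("no window of length max(max_gc_run+1,1) is all-GC"); objective: alternative, same cost.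

-- `b in 'GC'` for a single character b (exact: a 1-char substring test is membership)
def pvIsGC (b : Char) : Bool := b == 'G' || b == 'C'

-- ===== PORT A =====
-- the for-loop with its running counter and early returns
def pvLoopA (max_gc_run : Int) : List Char → Int → Bool
  | [], _ => true
  | b :: rest, gc_run =>
    if pvIsGC b then
      let gc_run := gc_run + 1
      if gc_run > max_gc_run then false else pvLoopA max_gc_run rest gc_run
    else pvLoopA max_gc_run rest 0

def three_prime (seq : String) (max_gcs : Int) (max_gc_run : Int) : Bool :=
  let tp := PySem.List.slice seq.toList (some (-5)) none
  let gcs : Int := (PySem.Chars.count tp ['G'] : Int) + (PySem.Chars.count tp ['C'] : Int)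
  if gcs > max_gcs then false
  else pvLoopA max_gc_run tp 0

-- ===== PORT B =====
def three_prime_alt (seq : String) (max_gcs : Int) (max_gc_run : Int) : Bool :=
  let tp := PySem.List.slice seq.toList (some (-5)) none
  if ((PySem.Chars.count tp ['G'] : Int) + (PySem.Chars.count tp ['C'] : Int)) > max_gcs then false
  else
    let w : Int := max (max_gc_run + 1) 1
    !((PySem.List.pyRange 0 ((tp.length : Int) - w + 1) 1).any
        (fun i => (PySem.List.slice tp (some i) (some (i + w))).all pvIsGC))

-- ===== PRECONDITION & SPEC =====
def Spec_three_prime (seq : String) (max_gcs : Int) (max_gc_run : Int) (out : Bool) : Prop := out = three_prime_alt seq max_gcs max_gc_run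
instance (seq : String) (max_gcs : Int) (max_gc_run : Int) (out : Bool) : Decidable (Spec_three_prime seq max_gcs max_gc_run out) := by unfold Spec_three_prime; infer_instance

-- ===== CLAIM (what is proved, stated in full; the proofs are below) =====
def Claim_equal_three_prime : Prop := ∀ (seq : String) (max_gcs : Int) (max_gc_run : Int), Dom_three_prime seq max_gcs max_gc_run → Spec_three_prime seq max_gcs max_gc_run (three_prime seq max_gcs max_gc_run)

-- ===== LEMMAS AND PROOFS =====

-- proof-only: "the first w characters exist and are all G/C"
def pvTakeGC : Nat → List Char → Bool
  | 0, _ => true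
  | _+1, [] => false
  | w+1, b :: r => pvIsGC b && pvTakeGC w r

-- proof-only: "some w consecutive characters are all G/C"
def pvHasRun (w : Nat) : List Char → Bool
  | [] => false
  | b :: r => pvTakeGC w (b :: r) || pvHasRun w r

theorem pvBool_ext (a b : Bool) (h : a = true ↔ b = true) : a = b := by
  cases a <;> cases b <;> simp_all

theorem pvTakeGC_mono (l : List Char) (j k : Nat) (h : j ≤ k)
    (hk : pvTakeGC k l = true) : pvTakeGC j l = true := by
  induction l generalizing j k with
  | nil =>
    cases k with
    | zero => have hj : j = 0 := by omega
              subst hj; exact hk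
    | succ k => simp [pvTakeGC] at hk
  | cons b r ih =>
    cases j with
    | zero => simp [pvTakeGC]
    | succ j =>
      cases k with
      | zero => omega
      | succ k =>
        simp only [pvTakeGC, Bool.and_eq_true] at hk ⊢
        exact ⟨hk.1, ih j k (by omega) hk.2⟩

theorem pvTakeGC_iff (l : List Char) (w : Nat) :
    pvTakeGC w l = true ↔ w ≤ l.length ∧ ((l.take w).all pvIsGC = true) := by
  induction l generalizing w with
  | nil => cases w <;> simp [pvTakeGC]
  | cons b r ih =>
    cases w with
    | zero => simp [pvTakeGC]
    | succ w =>
      simp only [pvTakeGC, Bool.and_eq_true, List.take_succ_cons, List.all_cons,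
        List.length_cons, ih]
      constructor
      · rintro ⟨h1, h2, h3⟩; exact ⟨by omega, h1, h3⟩
      · rintro ⟨h1, h2, h3⟩; exact ⟨h2, by omega, h3⟩

theorem pvHasRun_iff (l : List Char) (w : Nat) (hw : 1 ≤ w) :
    pvHasRun w l = true ↔ ∃ j : Nat, j + w ≤ l.length ∧ (((l.drop j).take w).all pvIsGC = true) := by
  induction l with
  | nil =>
    simp only [pvHasRun, List.length_nil]
    constructor
    · intro h; cases h
    · rintro ⟨j, hj, -⟩; omega
  | cons b r ih =>
    simp only [pvHasRun, Bool.or_eq_true, pvTakeGC_iff, ih, List.length_cons]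
    constructor
    · rintro (⟨h1, h2⟩ | ⟨j, hj, hall⟩)
      · exact ⟨0, by simpa using h1, by simpa using h2⟩
      · exact ⟨j + 1, by omega, by simpa using hall⟩
    · rintro ⟨j, hj, hall⟩
      cases j with
      | zero => exact Or.inl ⟨by simpa using hj, by simpa using hall⟩
      | succ j => exact Or.inr ⟨j, by omega, by simpa using hall⟩

theorem pvHasRun_absorb (l : List Char) (w : Nat) (hw : 1 ≤ w) :
    (pvTakeGC w l || pvHasRun w l) = pvHasRun w l := by
  cases l with
  | nil =>
    cases w with
    | zero => omega
    | succ w => simp [pvTakeGC, pvHasRun]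
  | cons b r =>
    simp only [pvHasRun]
    cases hx : pvTakeGC w (b :: r) <;> simp_all

theorem pvLoopA_neg (m : Int) (hm : m < 0) (l : List Char) :
    pvLoopA m l 0 = !pvHasRun 1 l := by
  induction l with
  | nil => simp [pvLoopA, pvHasRun]
  | cons b r ih =>
    by_cases hb : pvIsGC b = true
    · have hgt : (1 : Int) > m := by omega
      simp [pvLoopA, pvHasRun, pvTakeGC, hb, hgt]
    · simp only [pvLoopA, hb, Bool.false_eq_true, if_false]
      rw [ih]
      simp [pvHasRun, pvTakeGC, hb]

theorem pvLoopA_general (l : List Char) (m n : Nat) (h : n ≤ m) :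
    pvLoopA (m : Int) l (n : Int) = !(pvTakeGC (m + 1 - n) l || pvHasRun (m + 1) l) := by
  induction l generalizing n with
  | nil =>
    have hk : m + 1 - n = (m - n) + 1 := by omega
    simp [pvLoopA, pvHasRun, hk, pvTakeGC]
  | cons b r ih =>
    by_cases hb : pvIsGC b = true
    · by_cases hn : n = m
      · have hgt : (n : Int) + 1 > (m : Int) := by omega
        have hk : m + 1 - n = 1 := by omega
        simp [pvLoopA, hb, hgt, hk, pvTakeGC]
      · have hgt : ¬ ((n : Int) + 1 > (m : Int)) := by omega
        have hcast : (n : Int) + 1 = ((n + 1 : Nat) : Int) := by push_cast; ring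
        simp only [pvLoopA, hb, if_true, if_neg hgt]
        rw [hcast, ih (n + 1) (by omega)]
        have hk1 : m + 1 - n = (m - n) + 1 := by omega
        have hk2 : m + 1 - (n + 1) = m - n := by omega
        rw [hk1, hk2]
        show _ = !(pvTakeGC ((m - n) + 1) (b :: r) || pvHasRun (m + 1) (b :: r))
        have e1 : pvTakeGC ((m - n) + 1) (b :: r) = pvTakeGC (m - n) r := by
          simp [pvTakeGC, hb]
        have e2 : pvHasRun (m + 1) (b :: r) = (pvTakeGC m r || pvHasRun (m + 1) r) := by
          show (pvTakeGC (m + 1) (b :: r) || _) = _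
          simp [pvTakeGC, hb]
        rw [e1, e2]
        by_cases hm' : pvTakeGC m r = true
        · have := pvTakeGC_mono r (m - n) m (by omega) hm'
          simp [hm', this]
        · simp [Bool.not_eq_true] at hm'
          simp [hm']
    · simp only [pvLoopA, hb, Bool.false_eq_true, if_false]
      have h0 : ((0 : Nat) : Int) = (0 : Int) := rfl
      rw [← h0, ih 0 (by omega)]
      have e1 : pvTakeGC (m + 1 - n) (b :: r) = false := by
        have hk : m + 1 - n = (m - n) + 1 := by omega
        simp [hk, pvTakeGC, hb]
      have e2 : pvHasRun (m + 1) (b :: r) = pvHasRun (m + 1) r := by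
        show (pvTakeGC (m + 1) (b :: r) || _) = _
        simp [pvTakeGC, hb]
      rw [show m + 1 - 0 = m + 1 from rfl, pvHasRun_absorb r (m + 1) (by omega)]
      show _ = !(pvTakeGC (m + 1 - n) (b :: r) || pvHasRun (m + 1) (b :: r))
      rw [e1, e2]
      simp

theorem pvLoopA_eq_hasRun (m : Int) (l : List Char) :
    pvLoopA m l 0 = !pvHasRun (max (m + 1) 1).toNat l := by
  by_cases hm : 0 ≤ m
  · have h1 : (max (m + 1) 1) = m + 1 := max_eq_left (by omega)
    have h2 : (m + 1).toNat = m.toNat + 1 := by omega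
    have h3 : ((m.toNat : Nat) : Int) = m := Int.toNat_of_nonneg hm
    rw [h1, h2]
    have hgen := pvLoopA_general l m.toNat 0 (by omega)
    rw [h3] at hgen
    simpa [pvHasRun_absorb l (m.toNat + 1) (by omega)] using hgen
  · have h1 : (max (m + 1) 1) = 1 := max_eq_right (by omega)
    rw [h1]
    exact pvLoopA_neg m (by omega) l

theorem pvAny_eq_hasRun (l : List Char) (wn : Nat) (hw : 1 ≤ wn) :
    ((PySem.List.pyRange 0 ((l.length : Int) - (wn : Int) + 1) 1).any
        (fun i => (PySem.List.slice l (some i) (some (i + (wn : Int)))).all pvIsGC))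
      = pvHasRun wn l := by
  apply pvBool_ext
  rw [List.any_eq_true, pvHasRun_iff l wn hw]
  constructor
  · rintro ⟨i, hi, hall⟩
    rw [PySem.List.mem_pyRange_one] at hi
    obtain ⟨hi0, hi1⟩ := hi
    refine ⟨i.toNat, by omega, ?_⟩
    have hc : i = ((i.toNat : Nat) : Int) := (Int.toNat_of_nonneg hi0).symm
    rw [hc, PySem.List.slice_natCast_add] at hall
    exact hall
  · rintro ⟨j, hj, hall⟩
    refine ⟨(j : Int), ?_, ?_⟩
    · rw [PySem.List.mem_pyRange_one]; omega
    · rw [PySem.List.slice_natCast_add]; exact hall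

-- ===== VERDICT (by name: the statement is the Claim_ definition above) =====
theorem three_prime_spec : Claim_equal_three_prime := by
  intro seq max_gcs max_gc_run _
  unfold Spec_three_prime three_prime three_prime_alt
  set tp := PySem.List.slice seq.toList (some (-5)) none with htp
  by_cases hgc : ((PySem.Chars.count tp ['G'] : Int) + (PySem.Chars.count tp ['C'] : Int)) > max_gcs
  · simp [hgc]
  · simp only [hgc, if_false]
    have hw1 : (1 : Int) ≤ max (max_gc_run + 1) 1 := le_max_right _ _
    have hwc : max (max_gc_run + 1) 1 = (((max (max_gc_run + 1) 1).toNat : Nat) : Int) :=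
      (Int.toNat_of_nonneg (by omega)).symm
    rw [hwc, pvAny_eq_hasRun tp (max (max_gc_run + 1) 1).toNat (by omega),
      pvLoopA_eq_hasRun max_gc_run tp]
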